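-- pv_equiv track=rewrite | github.com/Anduong1200/sentinel-netlab | sensor/tui/setup_wizard.py | choose_best_interface
-- ===== SOURCE A (Python) =====
-- from collections.abc import Callable, Mapping, Sequence
--
-- def choose_best_interface(available_ifaces: Sequence[str] | None) -> str:
--     """Prefer monitor-mode interfaces when available."""
--     for iface in available_ifaces or []:
--         if iface and iface != "(none detected)" and "mon" in iface:
--             return iface
--     for iface in available_ifaces or []:
--         if iface and iface != "(none detected)":
--             return iface
--     return "wlan0mon"
-- ===== SOURCE B (Python) =====
-- def choose_best_interface(available_ifaces):
--     """Prefer monitor-mode interfaces when available (single pass)."""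
--     fallback = None
--     for iface in available_ifaces or []:
--         if iface and iface != "(none detected)":
--             if "mon" in iface:
--                 return iface
--             if fallback is None:
--                 fallback = iface
--     return fallback if fallback is not None else "wlan0mon"
-- ===== Notes on version B (the rewrite author's own statement) =====
-- stated objective: simpler
-- what changed: A's two separate scans over the list are fused into one pass that returns the first monitor-mode interface immediately and remembers the first valid interface as a fallback.
import Mathlib
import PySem

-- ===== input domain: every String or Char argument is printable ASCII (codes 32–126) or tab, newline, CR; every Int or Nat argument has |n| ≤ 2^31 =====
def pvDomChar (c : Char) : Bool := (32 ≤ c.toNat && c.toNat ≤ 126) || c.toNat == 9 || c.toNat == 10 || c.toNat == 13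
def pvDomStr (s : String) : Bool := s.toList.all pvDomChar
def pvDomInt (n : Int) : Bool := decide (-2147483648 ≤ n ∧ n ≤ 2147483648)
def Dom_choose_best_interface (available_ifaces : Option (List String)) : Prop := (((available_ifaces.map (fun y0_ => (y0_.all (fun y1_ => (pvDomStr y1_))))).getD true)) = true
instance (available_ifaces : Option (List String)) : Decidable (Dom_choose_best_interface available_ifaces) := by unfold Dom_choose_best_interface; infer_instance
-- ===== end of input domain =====

-- B fuses A's two scans into one pass with a first-valid fallback; same result, simpler shape.

-- ===== PORT A =====
-- first loop of A: first valid interface containing "mon"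
def pvScanMon : List String → Option String
  | [] => none
  | i :: t =>
    if i ≠ "" ∧ i ≠ "(none detected)" ∧ PySem.Str.isIn "mon" i = true then some i
    else pvScanMon t

-- second loop of A: first valid interface
def pvScanValid : List String → Option String
  | [] => none
  | i :: t =>
    if i ≠ "" ∧ i ≠ "(none detected)" then some i
    else pvScanValid t

def choose_best_interface (available_ifaces : Option (List String)) : String :=
  let xs := available_ifaces.getD []
  match pvScanMon xs with
  | some i => i
  | none =>
    match pvScanValid xs with
    | some i => i
    | none => "wlan0mon"

-- ===== PORT B =====
-- single pass carrying the first-valid fallback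
def pvLoopB : List String → Option String → String
  | [], fb => fb.getD "wlan0mon"
  | i :: t, fb =>
    if i ≠ "" ∧ i ≠ "(none detected)" then
      if PySem.Str.isIn "mon" i = true then i
      else pvLoopB t (if fb.isNone then some i else fb)
    else pvLoopB t fb

def choose_best_interface_alt (available_ifaces : Option (List String)) : String :=
  pvLoopB (available_ifaces.getD []) none

-- ===== PRECONDITION & SPEC =====
def Spec_choose_best_interface (available_ifaces : Option (List String)) (out : String) : Prop := out = choose_best_interface_alt available_ifaces
instance (available_ifaces : Option (List String)) (out : String) : Decidable (Spec_choose_best_interface available_ifaces out) := by unfold Spec_choose_best_interface; infer_instance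

-- ===== CLAIM (what is proved, stated in full; the proofs are below) =====
def Claim_equal_choose_best_interface : Prop := ∀ (available_ifaces : Option (List String)), Dom_choose_best_interface available_ifaces → Spec_choose_best_interface available_ifaces (choose_best_interface available_ifaces)

-- ===== LEMMAS AND PROOFS =====
theorem pvLoopB_eq (xs : List String) (fb : Option String) :
    pvLoopB xs fb =
      match pvScanMon xs with
      | some m => m
      | none =>
        match fb with
        | some f => f
        | none =>
          match pvScanValid xs with
          | some v => v
          | none => "wlan0mon" := by
  induction xs generalizing fb with
  | nil => cases fb <;> simp [pvLoopB, pvScanMon, pvScanValid, Option.getD]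
  | cons i t ih =>
    by_cases hv : i ≠ "" ∧ i ≠ "(none detected)"
    · by_cases hm : PySem.Str.isIn "mon" i = true
      · simp [PySem.Str.isIn] at hm
        simp [pvLoopB, pvScanMon, hv, hm]
      · simp [PySem.Str.isIn] at hm
        cases fb <;>
          simp [pvLoopB, pvScanMon, pvScanValid, hv, hm, ih]
    · have h1 : ¬ (i ≠ "" ∧ i ≠ "(none detected)" ∧ PySem.Str.isIn "mon" i = true) := by
        intro h; exact hv ⟨h.1, h.2.1⟩
      simp only [pvLoopB, pvScanMon, pvScanValid, if_neg hv, if_neg h1]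
      exact ih fb

-- ===== VERDICT (by name: the statement is the Claim_ definition above) =====
theorem choose_best_interface_spec : Claim_equal_choose_best_interface := by
  intro available_ifaces _
  show _ = _
  unfold choose_best_interface choose_best_interface_alt
  rw [pvLoopB_eq]
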